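-- pv_equiv track=rewrite | github.com/suyang-nju/hdx-scratch | align.py | _map_alignment
-- ===== SOURCE A (Python) =====
-- def _map_alignment(seq2a):
--     '''
--     map the indices of two aligned sequences, seq1a and seq2a.
--     seq1a and seq2a mostly form 1-to-1 correspondance, but if
--     a residue in seq1a maps to - or X in seq2a, find the nearest
--     non- - or X residue to the left and right in seq2a.
--     '''
--     m_left = [ 0 ] * len(seq2a)
--     m_right = [ len(seq2a) - 1 ] * len(seq2a)
--     for i in range(len(seq2a)):
--         if seq2a[i] not in '-X':
--             m_left[i] = i
--             m_right[i] = i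
--         else:
--             if i > 0: m_left[i] = m_left[i - 1]
--             if (i > 0) and (seq2a[i - 1] in '-X'):
--                 m_right[i] = m_right[i - 1]
--             else:
--                 j = i + 1
--                 while (j < len(seq2a)) and (seq2a[j] in '-X'): j += 1
--                 if j < len(seq2a): m_right[i] = j
--     return m_left, m_right
-- ===== SOURCE B (Python) =====
-- def _map_alignment(seq2a):
--     n = len(seq2a)
--     m_left = []
--     last = 0
--     for i in range(n):
--         if seq2a[i] not in '-X':
--             last = i
--         m_left.append(last)
--     m_right_rev = []
--     nxt = n - 1
--     for i in reversed(range(n)):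
--         if seq2a[i] not in '-X':
--             nxt = i
--         m_right_rev.append(nxt)
--     return m_left, m_right_rev[::-1]
-- ===== Notes on version B (the rewrite author's own statement) =====
-- stated objective: simpler
-- what changed: Replaces A's single forward loop (with an inner while-scan over each gap run and prev-gap special-casing for m_right) by two independent single passes: a forward pass carrying the last non-gap index for m_left and a backward pass carrying the next non-gap index for m_right.
import Mathlib
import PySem

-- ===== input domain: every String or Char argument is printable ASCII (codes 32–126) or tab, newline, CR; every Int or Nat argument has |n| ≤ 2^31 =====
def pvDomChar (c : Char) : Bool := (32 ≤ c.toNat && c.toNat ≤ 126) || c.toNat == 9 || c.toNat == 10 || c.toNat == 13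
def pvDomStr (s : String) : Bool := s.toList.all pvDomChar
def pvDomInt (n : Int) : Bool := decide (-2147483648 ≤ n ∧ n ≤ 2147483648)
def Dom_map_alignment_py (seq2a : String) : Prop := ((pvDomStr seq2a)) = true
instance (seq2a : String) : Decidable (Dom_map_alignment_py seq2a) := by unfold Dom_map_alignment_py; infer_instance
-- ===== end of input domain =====

-- B replaces A's forward loop with an inner forward gap-run scan by two independent
-- single passes (forward for m_left, backward for m_right); objective: simpler.

-- `c in '-X'` (membership of a char in the two-char string)
def isGapC (c : Char) : Bool := c == '-' || c == 'X'

-- ===== PORT A =====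
-- the inner `while (j < len) and (seq2a[j] in '-X'): j += 1` loop
def pvScanGap (cs : List Char) (j : Nat) : Nat :=
  if h : j < cs.length then
    if isGapC (cs.getD j ' ') then pvScanGap cs (j + 1) else j
  else j
termination_by cs.length - j
decreasing_by omega

-- one iteration of A's `for i in range(len(seq2a))` body, state = (m_left, m_right)
def aStep (cs : List Char) (st : List Int × List Int) (i : Nat) : List Int × List Int :=
  if isGapC (cs.getD i ' ') = false then
    (st.1.set i (i : Int), st.2.set i (i : Int))
  else
    let ml := if 0 < i then st.1.set i (st.1.getD (i - 1) 0) else st.1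
    let mr :=
      if 0 < i ∧ isGapC (cs.getD (i - 1) ' ') = true then
        st.2.set i (st.2.getD (i - 1) 0)
      else
        let j := pvScanGap cs (i + 1)
        if j < cs.length then st.2.set i (j : Int) else st.2
    (ml, mr)

def map_alignment_py (seq2a : String) : List Int × List Int :=
  let cs := seq2a.toList
  let n := cs.length
  (List.range n).foldl (aStep cs)
    (List.replicate n (0 : Int), List.replicate n ((n : Int) - 1))

-- ===== PORT B =====
-- forward pass: carry `last`, append it for every index
def bFwStep (cs : List Char) (st : Int × List Int) (i : Nat) : Int × List Int :=
  let last := if isGapC (cs.getD i ' ') = false then (i : Int) else st.1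
  (last, st.2 ++ [last])

-- backward pass (over reversed(range(n))): carry `nxt`, append it for every index
def bBwStep (cs : List Char) (st : Int × List Int) (i : Nat) : Int × List Int :=
  let nxt := if isGapC (cs.getD i ' ') = false then (i : Int) else st.1
  (nxt, st.2 ++ [nxt])

def map_alignment_py_alt (seq2a : String) : List Int × List Int :=
  let cs := seq2a.toList
  let n := cs.length
  let fw := (List.range n).foldl (bFwStep cs) (0, [])
  let bw := ((List.range n).reverse).foldl (bBwStep cs) ((n : Int) - 1, [])
  (fw.2, bw.2.reverse)

-- ===== PRECONDITION & SPEC =====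
def Spec_map_alignment_py (seq2a : String) (out : List Int × List Int) : Prop := out = map_alignment_py_alt seq2a
instance (seq2a : String) (out : List Int × List Int) : Decidable (Spec_map_alignment_py seq2a out) := by unfold Spec_map_alignment_py; infer_instance

-- ===== CLAIM (what is proved, stated in full; the proofs are below) =====
def Claim_equal_map_alignment_py : Prop := ∀ (seq2a : String), Dom_map_alignment_py seq2a → Spec_map_alignment_py seq2a (map_alignment_py seq2a)

-- ===== LEMMAS AND PROOFS =====

-- index of the nearest non-gap residue at or to the left of i (0 if none)
def lNg (cs : List Char) : Nat → Int
  | 0 => 0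
  | i + 1 => if isGapC (cs.getD (i + 1) ' ') = false then ((i + 1 : Nat) : Int) else lNg cs i

-- index of the nearest non-gap residue at or to the right of i (len-1 if none)
def rNg (cs : List Char) (i : Nat) : Int :=
  if isGapC (cs.getD i ' ') = false then (i : Int)
  else if h : i + 1 < cs.length then rNg cs (i + 1) else (cs.length : Int) - 1
termination_by cs.length - i
decreasing_by omega

lemma gap_ne_false {b : Bool} (h : b = true) : ¬ (b = false) := by rw [h]; simp
lemma gap_ne_true {b : Bool} (h : b = false) : ¬ (b = true) := by rw [h]; simp

lemma lNg_nongap (cs : List Char) (i : Nat) (h : isGapC (cs.getD i ' ') = false) :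
    lNg cs i = (i : Int) := by
  cases i with
  | zero => simp [lNg]
  | succ j => simp only [lNg]; rw [if_pos h]

lemma rNg_nongap (cs : List Char) (i : Nat) (h : isGapC (cs.getD i ' ') = false) :
    rNg cs i = (i : Int) := by
  rw [rNg, if_pos h]

lemma rNg_gap_step (cs : List Char) (i : Nat) (hg : isGapC (cs.getD i ' ') = true)
    (h : i + 1 < cs.length) : rNg cs i = rNg cs (i + 1) := by
  rw [rNg, if_neg (gap_ne_false hg), dif_pos h]

lemma rNg_scan_aux (cs : List Char) : ∀ m i, cs.length - i ≤ m →
    isGapC (cs.getD i ' ') = true →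
    rNg cs i = if pvScanGap cs (i + 1) < cs.length
               then ((pvScanGap cs (i + 1) : Nat) : Int) else (cs.length : Int) - 1 := by
  intro m
  induction m with
  | zero =>
    intro i hm hg
    rw [rNg, if_neg (gap_ne_false hg), dif_neg (by omega), pvScanGap, dif_neg (by omega),
        if_neg (by omega)]
  | succ m ih =>
    intro i hm hg
    rw [rNg, if_neg (gap_ne_false hg)]
    by_cases h1 : i + 1 < cs.length
    · rw [dif_pos h1]
      by_cases hg1 : isGapC (cs.getD (i + 1) ' ') = true
      · rw [pvScanGap, dif_pos h1, if_pos hg1]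
        exact ih (i + 1) (by omega) hg1
      · rw [Bool.not_eq_true] at hg1
        rw [pvScanGap, dif_pos h1, if_neg (gap_ne_true hg1), if_pos h1,
            rNg_nongap cs (i + 1) hg1]
    · rw [dif_neg h1, pvScanGap, dif_neg h1, if_neg h1]

lemma rNg_scan (cs : List Char) (i : Nat) (hg : isGapC (cs.getD i ' ') = true) :
    rNg cs i = if pvScanGap cs (i + 1) < cs.length
               then ((pvScanGap cs (i + 1) : Nat) : Int) else (cs.length : Int) - 1 :=
  rNg_scan_aux cs (cs.length - i) i (le_refl _) hg

-- state of A's arrays after k iterations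
def Lspec (cs : List Char) (k : Nat) : List Int :=
  (List.range cs.length).map (fun i => if i < k then lNg cs i else 0)
def Rspec (cs : List Char) (k : Nat) : List Int :=
  (List.range cs.length).map (fun i => if i < k then rNg cs i else (cs.length : Int) - 1)

lemma map_range_if_set (n k : Nat) (f g : Nat → Int) (h : k < n) :
    ((List.range n).map (fun i => if i < k then f i else g i)).set k (f k)
      = (List.range n).map (fun i => if i < k + 1 then f i else g i) := by
  apply List.ext_getElem
  · simp
  · intro i h1 h2
    simp only [List.getElem_set, List.getElem_map, List.getElem_range]
    by_cases hik : i = k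
    · subst hik
      rw [if_pos rfl, if_pos (Nat.lt_succ_self _)]
    · rw [if_neg (fun he => hik he.symm)]
      by_cases hlt : i < k
      · rw [if_pos hlt, if_pos (by omega)]
      · rw [if_neg hlt, if_neg (by omega)]

lemma map_range_if_noset (n k : Nat) (f g : Nat → Int) (h : k < n) (hfg : f k = g k) :
    (List.range n).map (fun i => if i < k then f i else g i)
      = (List.range n).map (fun i => if i < k + 1 then f i else g i) := by
  apply List.map_congr_left
  intro i hi
  by_cases hik : i = k
  · subst hik
    rw [if_neg (lt_irrefl _), if_pos (Nat.lt_succ_self _), hfg]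
  · by_cases hlt : i < k
    · rw [if_pos hlt, if_pos (by omega)]
    · rw [if_neg hlt, if_neg (by omega)]

lemma map_range_getD (n k : Nat) (f : Nat → Int) (h : k < n) (d : Int) :
    ((List.range n).map f).getD k d = f k := by
  rw [List.getD_eq_getElem _ _ (by simpa using h)]
  simp

lemma a_inv (cs : List Char) : ∀ k, k ≤ cs.length →
    (List.range k).foldl (aStep cs)
      (List.replicate cs.length (0 : Int), List.replicate cs.length ((cs.length : Int) - 1))
      = (Lspec cs k, Rspec cs k) := by
  intro k
  induction k with
  | zero =>
    intro _
    simp [Lspec, Rspec, List.map_const']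
  | succ k ih =>
    intro hk
    rw [List.range_succ, List.foldl_append, ih (by omega)]
    have hkn : k < cs.length := by omega
    simp only [List.foldl_cons, List.foldl_nil]
    unfold aStep
    by_cases hg : isGapC (cs.getD k ' ') = false
    · rw [if_pos hg]
      unfold Lspec Rspec
      have h1 := map_range_if_set cs.length k (lNg cs) (fun _ => 0) hkn
      have h2 := map_range_if_set cs.length k (rNg cs) (fun _ => (cs.length : Int) - 1) hkn
      rw [lNg_nongap cs k hg] at h1
      rw [rNg_nongap cs k hg] at h2
      rw [h1, h2]
    · rw [if_neg hg]
      rw [Bool.not_eq_false] at hg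
      have hml : (if 0 < k then (Lspec cs k).set k ((Lspec cs k).getD (k - 1) 0)
                  else Lspec cs k) = Lspec cs (k + 1) := by
        by_cases hk0 : 0 < k
        · rw [if_pos hk0]
          unfold Lspec
          rw [map_range_getD _ _ _ (by omega)]
          rw [show (if k - 1 < k then lNg cs (k - 1) else 0) = lNg cs k by
            rw [if_pos (by omega)]
            obtain ⟨j, rfl⟩ : ∃ j, k = j + 1 := ⟨k - 1, by omega⟩
            simp only [lNg]
            rw [if_neg (gap_ne_false hg), Nat.add_sub_cancel]]
          exact map_range_if_set _ _ _ _ hkn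
        · rw [if_neg hk0]
          have hk0' : k = 0 := by omega
          subst hk0'
          exact map_range_if_noset _ _ _ _ hkn (by simp [lNg])
      have hmr : (if 0 < k ∧ isGapC (cs.getD (k - 1) ' ') = true then
                    (Rspec cs k).set k ((Rspec cs k).getD (k - 1) 0)
                  else
                    if pvScanGap cs (k + 1) < cs.length then
                      (Rspec cs k).set k ((pvScanGap cs (k + 1) : Nat) : Int)
                    else Rspec cs k) = Rspec cs (k + 1) := by
        by_cases hc : 0 < k ∧ isGapC (cs.getD (k - 1) ' ') = true
        · rw [if_pos hc]
          unfold Rspec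
          rw [map_range_getD _ _ _ (by omega)]
          rw [show (if k - 1 < k then rNg cs (k - 1) else (cs.length : Int) - 1) = rNg cs k by
            rw [if_pos (by omega)]
            have := rNg_gap_step cs (k - 1) hc.2 (by omega)
            rw [this, show k - 1 + 1 = k by omega]]
          exact map_range_if_set _ _ _ _ hkn
        · rw [if_neg hc]
          have hscan := rNg_scan cs k hg
          by_cases hj : pvScanGap cs (k + 1) < cs.length
          · rw [if_pos hj]
            unfold Rspec
            rw [show ((pvScanGap cs (k + 1) : Nat) : Int) = rNg cs k by
              rw [hscan, if_pos hj]]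
            exact map_range_if_set _ _ _ _ hkn
          · rw [if_neg hj]
            unfold Rspec
            refine map_range_if_noset _ _ _ _ hkn ?_
            rw [hscan, if_neg hj]
      rw [hml, hmr]

-- value of `last` after B's forward pass over range k
def lastVal (cs : List Char) : Nat → Int
  | 0 => 0
  | k + 1 => lNg cs k

lemma b_fw_inv (cs : List Char) : ∀ k,
    (List.range k).foldl (bFwStep cs) (0, [])
      = (lastVal cs k, (List.range k).map (lNg cs)) := by
  intro k
  induction k with
  | zero => simp [lastVal]
  | succ k ih =>
    rw [List.range_succ, List.foldl_append, ih]
    simp only [List.foldl_cons, List.foldl_nil, List.map_append, List.map_cons, List.map_nil]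
    have hlast : (if isGapC (cs.getD k ' ') = false then (k : Int) else lastVal cs k)
        = lNg cs k := by
      by_cases hg : isGapC (cs.getD k ' ') = false
      · rw [if_pos hg, lNg_nongap cs k hg]
      · rw [if_neg hg]
        cases k with
        | zero => simp [lNg, lastVal]
        | succ j => simp only [lastVal, lNg]; rw [if_neg hg]
    show bFwStep cs (lastVal cs k, (List.range k).map (lNg cs)) k
          = (lastVal cs (k + 1), (List.range k).map (lNg cs) ++ [lNg cs k])
    unfold bFwStep
    simp only
    rw [hlast]
    rfl

-- value of `nxt` entering B's backward pass at index k-1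
def inNxt (cs : List Char) (k : Nat) : Int :=
  if k = cs.length then (cs.length : Int) - 1 else rNg cs k

lemma b_bw_inv (cs : List Char) : ∀ k, k ≤ cs.length → ∀ acc : List Int,
    ((List.range k).reverse).foldl (bBwStep cs) (inNxt cs k, acc)
      = (inNxt cs 0, acc ++ ((List.range k).reverse).map (rNg cs)) := by
  intro k
  induction k with
  | zero => intro _ acc; simp
  | succ k ih =>
    intro hk acc
    rw [List.range_succ, List.reverse_append]
    simp only [List.reverse_cons, List.reverse_nil, List.nil_append, List.cons_append,
      List.foldl_cons, List.map_cons]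
    have hkn : k < cs.length := by omega
    have hstep : bBwStep cs (inNxt cs (k + 1), acc) k = (inNxt cs k, acc ++ [rNg cs k]) := by
      unfold bBwStep
      simp only
      have hnxt : (if isGapC (cs.getD k ' ') = false then (k : Int) else inNxt cs (k + 1))
          = rNg cs k := by
        by_cases hg : isGapC (cs.getD k ' ') = false
        · rw [if_pos hg, rNg_nongap cs k hg]
        · rw [if_neg hg]
          rw [Bool.not_eq_false] at hg
          unfold inNxt
          by_cases h1 : k + 1 < cs.length
          · rw [if_neg (by omega), rNg_gap_step cs k hg h1]
          · have he : k + 1 = cs.length := by omega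
            rw [if_pos he, rNg, if_neg (gap_ne_false hg), dif_neg h1]
      rw [hnxt]
      unfold inNxt
      rw [if_neg (Nat.ne_of_lt hkn)]
    rw [hstep, ih (by omega) (acc ++ [rNg cs k])]
    simp

-- ===== VERDICT (by name: the statement is the Claim_ definition above) =====
theorem map_alignment_py_spec : Claim_equal_map_alignment_py := by
  intro seq2a _
  unfold Spec_map_alignment_py map_alignment_py map_alignment_py_alt
  set cs := seq2a.toList with hcs
  simp only
  have hinit : inNxt cs cs.length = (cs.length : Int) - 1 := by rw [inNxt, if_pos rfl]
  rw [a_inv cs cs.length (le_refl _), b_fw_inv cs, ← hinit,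
      b_bw_inv cs cs.length (le_refl _) []]
  simp only [List.nil_append, List.map_reverse, List.reverse_reverse]
  refine Prod.ext ?_ ?_
  · show Lspec cs cs.length = List.map (lNg cs) (List.range cs.length)
    unfold Lspec
    apply List.map_congr_left
    intro i hi
    simp [List.mem_range.mp hi]
  · show Rspec cs cs.length = List.map (rNg cs) (List.range cs.length)
    unfold Rspec
    apply List.map_congr_left
    intro i hi
    simp [List.mem_range.mp hi]
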